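-- pv_equiv track=rewrite | github.com/RasaDovyd/JupyterNotes | Uzduotis_1.py | pasikartojancios_raides
-- ===== SOURCE A (Python) =====
-- def pasikartojancios_raides(zodziai):
--     pasikartojantys_z = []
--     for zodis in zodziai:
--         for raide in zodis:
--             if zodis.count(raide) > 1:
--                 pasikartojantys_z.append(zodis)
--                 break
--     return pasikartojantys_z
-- ===== SOURCE B (Python) =====
-- def pasikartojancios_raides(zodziai):
--     pasikartojantys_z = []
--     for zodis in zodziai:
--         s = sorted(zodis)
--         if any(x == y for x, y in zip(s, s[1:])):
--             pasikartojantys_z.append(zodis)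
--     return pasikartojantys_z
-- ===== Notes on version B (the rewrite author's own statement) =====
-- stated objective: alternative
-- what changed: Replaces A's per-letter count scan (quadratic in the word) with sort-then-adjacent-equality duplicate detection per word.
import Mathlib
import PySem

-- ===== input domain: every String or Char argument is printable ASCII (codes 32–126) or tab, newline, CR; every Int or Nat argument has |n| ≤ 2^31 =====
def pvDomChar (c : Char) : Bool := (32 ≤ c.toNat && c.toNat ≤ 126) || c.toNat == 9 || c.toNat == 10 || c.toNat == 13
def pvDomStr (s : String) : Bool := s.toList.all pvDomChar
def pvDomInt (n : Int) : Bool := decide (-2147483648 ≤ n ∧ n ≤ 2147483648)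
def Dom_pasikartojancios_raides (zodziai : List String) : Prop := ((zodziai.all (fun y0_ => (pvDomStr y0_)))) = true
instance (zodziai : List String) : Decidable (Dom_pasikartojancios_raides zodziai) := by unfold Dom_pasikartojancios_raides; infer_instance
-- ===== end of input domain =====

-- B detects a repeated letter by sorting each word and comparing adjacent characters,
-- instead of A's per-letter count scan; alternative algorithm, same append order.


-- ===== PORT A =====
-- inner 'for raide in zodis: if zodis.count(raide) > 1: append; break'
def pvInnerA (zodis : String) : List Char → List String → List String
  | [], acc => acc
  | raide :: rest, acc =>
      if 1 < PySem.Str.count zodis (String.ofList [raide]) then acc ++ [zodis]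
      else pvInnerA zodis rest acc

def pasikartojancios_raides (zodziai : List String) : List String :=
  zodziai.foldl (fun acc zodis => pvInnerA zodis zodis.toList acc) []

-- ===== PORT B =====
def pasikartojancios_raides_alt (zodziai : List String) : List String :=
  zodziai.foldl (fun acc zodis =>
    let s := PySem.List.sorted zodis.toList (fun c => c) false
    if (s.zip (PySem.List.slice s (some 1) none)).any (fun p => p.1 == p.2)
    then acc ++ [zodis] else acc) []

-- ===== PRECONDITION & SPEC =====
def Spec_pasikartojancios_raides (zodziai : List String) (out : List String) : Prop := out = pasikartojancios_raides_alt zodziai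
instance (zodziai : List String) (out : List String) : Decidable (Spec_pasikartojancios_raides zodziai out) := by unfold Spec_pasikartojancios_raides; infer_instance

-- ===== CLAIM (what is proved, stated in full; the proofs are below) =====
def Claim_equal_pasikartojancios_raides : Prop := ∀ (zodziai : List String), Dom_pasikartojancios_raides zodziai → Spec_pasikartojancios_raides zodziai (pasikartojancios_raides zodziai)

-- ===== LEMMAS AND PROOFS =====

-- Python str.count with a one-character needle is the character count.
theorem chars_count_go_singleton (c : Char) (fuel : Nat) (cs : List Char) (acc : Nat)
    (h : cs.length ≤ fuel) :
    PySem.Chars.count.go [c] fuel cs acc = acc + cs.count c := by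
  induction fuel generalizing cs acc with
  | zero =>
      cases cs with
      | nil => simp [PySem.Chars.count.go]
      | cons a t => simp at h
  | succ n ih =>
      cases cs with
      | nil => simp [PySem.Chars.count.go]
      | cons a t =>
          simp only [PySem.Chars.count.go]
          have hpre : List.isPrefixOf [c] (a :: t) = (c == a) := by
            cases t <;> simp [List.isPrefixOf]
          rw [hpre]
          have ht : t.length ≤ n := by simpa using Nat.le_of_succ_le_succ (by simpa using h)
          by_cases hc : c = a
          · subst hc
            simp only [beq_self_eq_true, if_true, List.length_cons, List.drop_succ_cons,
              List.length_nil, List.drop_zero]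
            rw [ih t (acc + 1) ht]
            simp only [List.count_cons, beq_self_eq_true, if_true]
            omega
          · rw [beq_false_of_ne hc]
            simp only [Bool.false_eq_true, if_false]
            rw [ih t acc ht]
            simp [List.count_cons, beq_false_of_ne (Ne.symm hc)]

theorem count_singleton (s : String) (c : Char) :
    PySem.Str.count s (String.ofList [c]) = s.toList.count c := by
  rw [PySem.Str.count_eq]
  have hmk : (String.ofList [c]).toList = [c] := by simp
  rw [hmk]
  unfold PySem.Chars.count
  simp only [List.isEmpty_cons, if_false, Bool.false_eq_true]
  simpa using chars_count_go_singleton c s.toList.length s.toList 0 (le_refl _)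

-- A's inner loop is a conditional single append.
theorem pvInnerA_eq (zodis : String) (cs : List Char) (acc : List String) :
    pvInnerA zodis cs acc =
      if cs.any (fun r => decide (1 < zodis.toList.count r)) then acc ++ [zodis] else acc := by
  induction cs with
  | nil => simp [pvInnerA]
  | cons r rest ih =>
      simp only [pvInnerA, count_singleton, List.any_cons]
      by_cases h : 1 < zodis.toList.count r
      · simp [h]
      · simp [h, ih]

-- A's test: some letter of the word occurs more than once ↔ the letters are not Nodup.
theorem any_count_gt_one_iff (l : List Char) :
    (l.any (fun r => decide (1 < l.count r)) = true) ↔ ¬ l.Nodup := by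
  rw [List.nodup_iff_count_le_one]
  simp only [List.any_eq_true, decide_eq_true_eq, not_forall]
  constructor
  · rintro ⟨r, _, hr⟩; exact ⟨r, by omega⟩
  · rintro ⟨r, hr⟩
    exact ⟨r, List.count_pos_iff.mp (by omega), by omega⟩

-- B's adjacent-pair scan as an adjacent-pairs IsChain statement.
theorem adj_zip_any_eq_false_iff (s : List Char) :
    ((s.zip (s.drop 1)).any (fun p => p.1 == p.2) = false) ↔ s.IsChain (· ≠ ·) := by
  induction s with
  | nil => simp
  | cons a t ih =>
      cases t with
      | nil => simp
      | cons b u =>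
          simp only [List.drop_succ_cons, List.drop_zero] at ih ⊢
          simp only [List.zip_cons_cons, List.any_cons, Bool.or_eq_false_iff,
            beq_eq_false_iff_ne, List.isChain_cons_cons]
          exact and_congr Iff.rfl ih

theorem adj_any_eq_false_iff (s : List Char) :
    ((s.zip (PySem.List.slice s (some 1) none)).any (fun p => p.1 == p.2) = false)
      ↔ s.IsChain (· ≠ ·) := by
  have hs : PySem.List.slice s (some 1) none = s.drop 1 := by
    simpa using PySem.List.slice_from s (by norm_num : (0:Int) ≤ 1)
  rw [hs]
  exact adj_zip_any_eq_false_iff s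

theorem ischain_lt_of_le_ne (s : List Char)
    (hle : s.IsChain (· ≤ ·)) (hne : s.IsChain (· ≠ ·)) : s.IsChain (· < ·) := by
  induction s with
  | nil => exact .nil
  | cons a t ih =>
      cases t with
      | nil => simp
      | cons b u =>
          rw [List.isChain_cons_cons] at hle hne ⊢
          exact ⟨lt_of_le_of_ne hle.1 hne.1, ih hle.2 hne.2⟩

-- On a ≤-sorted list, an adjacent equality exists iff the list has a duplicate.
theorem adj_any_iff_not_nodup (s : List Char) (hp : s.Pairwise (· ≤ ·)) :
    ((s.zip (PySem.List.slice s (some 1) none)).any (fun p => p.1 == p.2) = true)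
      ↔ ¬ s.Nodup := by
  constructor
  · intro h hnd
    have : ¬ s.IsChain (· ≠ ·) := by
      intro hc
      rw [← adj_any_eq_false_iff] at hc
      simp [hc] at h
    exact this (List.Pairwise.isChain hnd)
  · intro hnd
    by_contra h
    have hc : s.IsChain (· ≠ ·) := (adj_any_eq_false_iff s).mp (by
      cases hb : (s.zip (PySem.List.slice s (some 1) none)).any (fun p => p.1 == p.2)
      · rfl
      · exact absurd hb h)
    have hle : s.IsChain (· ≤ ·) := List.Pairwise.isChain hp
    have hlt : s.IsChain (· < ·) := ischain_lt_of_le_ne s hle hc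
    exact hnd (List.Pairwise.imp (fun h => ne_of_lt h) (List.isChain_iff_pairwise.mp hlt))

-- per-word predicates agree
theorem pred_eq (zodis : String) :
    (zodis.toList.any (fun r => decide (1 < zodis.toList.count r)))
      = (let s := PySem.List.sorted zodis.toList (fun c => c) false
         (s.zip (PySem.List.slice s (some 1) none)).any (fun p => p.1 == p.2)) := by
  set s := PySem.List.sorted zodis.toList (fun c => c) false with hsdef
  have hperm : s.Perm zodis.toList := PySem.List.sorted_perm _ _ _
  have hp : s.Pairwise (· ≤ ·) := by
    simpa using PySem.List.sorted_pairwise zodis.toList (fun c => c)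
  have h1 := any_count_gt_one_iff zodis.toList
  have h2 := adj_any_iff_not_nodup s hp
  rw [hperm.nodup_iff] at h2
  simp only []
  by_cases hnd : zodis.toList.Nodup
  · have a1 : (zodis.toList.any (fun r => decide (1 < zodis.toList.count r))) = false := by
      cases hb : (zodis.toList.any (fun r => decide (1 < zodis.toList.count r)))
      · rfl
      · exact absurd (h1.mp hb) (by simpa using hnd)
    have a2 : ((s.zip (PySem.List.slice s (some 1) none)).any (fun p => p.1 == p.2)) = false := by
      cases hb : ((s.zip (PySem.List.slice s (some 1) none)).any (fun p => p.1 == p.2))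
      · rfl
      · exact absurd (h2.mp hb) (by simpa using hnd)
    rw [a1, a2]
  · rw [h1.mpr hnd, h2.mpr hnd]

theorem fold_eq (zodziai : List String) (acc : List String) :
    zodziai.foldl (fun acc zodis => pvInnerA zodis zodis.toList acc) acc =
    zodziai.foldl (fun acc zodis =>
      let s := PySem.List.sorted zodis.toList (fun c => c) false
      if (s.zip (PySem.List.slice s (some 1) none)).any (fun p => p.1 == p.2)
      then acc ++ [zodis] else acc) acc := by
  induction zodziai generalizing acc with
  | nil => rfl
  | cons z t ih =>
      simp only [List.foldl_cons]
      rw [pvInnerA_eq, pred_eq z]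
      exact ih _

-- ===== VERDICT (by name: the statement is the Claim_ definition above) =====
theorem pasikartojancios_raides_spec : Claim_equal_pasikartojancios_raides := by
  intro zodziai _
  show pasikartojancios_raides zodziai = pasikartojancios_raides_alt zodziai
  exact fold_eq zodziai []
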